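-- pv_equiv track=rewrite | github.com/harshitjain17/Raman-Peak-Fitting-Model | ramanfitter_stage2.py | find_closest_key_index
-- ===== SOURCE A (Python) =====
-- def find_closest_key_index(dictionary, value):
--     """
--         find_closest_key_index(self, dictionary, value)
--
--         Find the index of the closest key in the dictionary to the given number
--
--         Parameters
--         ----------
--         dictionary : A dictionary object to search for the closest key.
--         value : A numerical value for which we want to find the closest key index.
--
--         Returns:
--         The index of the closest key in the dictionary to the given number.
--     """
--     closest_key = None
--     min_diff = None
--     for i, key in enumerate(dictionary.keys()):
--         diff = abs(value - key)
--         if min_diff is None or diff < min_diff: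
--             min_diff = diff
--             closest_key = key
--     return list(dictionary.keys()).index(closest_key)+1
-- ===== SOURCE B (Python) =====
-- def find_closest_key_index(dictionary, value):
--     # Rank every key (with its 1-based position) by distance to value; Python's
--     # stable sort keeps the earliest position first among ties, so the first
--     # ranked entry is exactly the first-closest key.
--     ranked = sorted(enumerate(dictionary, 1), key=lambda item: abs(value - item[1]))
--     return ranked[0][0]
-- ===== Notes on version B (the rewrite author's own statement) =====
-- stated objective: alternative
-- what changed: Replaces A's fused running-min scan (closest_key/min_diff accumulators plus a final list.index pass) with a sort-based ranking: sort the enumerated (position, key) pairs by absolute distance and return the first pair's position, relying on sort stability for first-wins tie-breaking.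
import Mathlib
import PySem

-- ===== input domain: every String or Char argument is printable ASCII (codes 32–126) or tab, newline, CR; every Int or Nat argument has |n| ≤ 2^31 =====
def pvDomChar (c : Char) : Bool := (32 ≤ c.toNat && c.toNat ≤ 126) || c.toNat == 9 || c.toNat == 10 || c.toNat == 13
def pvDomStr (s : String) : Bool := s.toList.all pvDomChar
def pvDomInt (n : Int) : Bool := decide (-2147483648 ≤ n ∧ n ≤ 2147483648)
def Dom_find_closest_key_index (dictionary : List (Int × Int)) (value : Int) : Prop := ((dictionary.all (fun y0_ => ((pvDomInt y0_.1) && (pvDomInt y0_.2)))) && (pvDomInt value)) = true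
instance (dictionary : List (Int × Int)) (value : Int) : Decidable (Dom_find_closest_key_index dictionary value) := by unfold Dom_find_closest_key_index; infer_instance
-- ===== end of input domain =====

-- B replaces A's fused running-min scan by a stable sort of (position, key) pairs ranked by distance; same values, different algorithm.

-- ===== PORT A =====
-- A iterates dictionary.keys(): the distinct keys in first-insertion order = PySem.List.dedup of the key list.
def find_closest_key_index (dictionary : List (Int × Int)) (value : Int) : Int :=
  let keys := PySem.List.dedup (dictionary.map (fun p => p.1))
  let st : Option Int × Option Int := keys.foldl
    (fun acc key =>
      let diff := |value - key|
      match acc.2 with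
      | none => (some key, some diff)
      | some m => if diff < m then (some key, some diff) else acc)
    (none, none)
  match st.1 with
  | none => 0  -- Python raises ValueError here ([].index(None)); excluded by Pre_
  | some ck =>
    match PySem.List.index? keys ck with
    | none => 0  -- unreachable: ck is a key
    | some i => (i : Int) + 1

-- ===== PORT B =====
def find_closest_key_index_alt (dictionary : List (Int × Int)) (value : Int) : Int :=
  let keys := PySem.List.dedup (dictionary.map (fun p => p.1))
  let ranked := PySem.List.sorted (PySem.List.enumerate keys 1) (fun item => |value - item.2|)
  match ranked with
  | [] => 0  -- Python raises IndexError here (ranked[0]); excluded by Pre_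
  | p :: _ => p.1

-- ===== PRECONDITION & SPEC =====
-- Pre_ excludes only the empty dictionary, on which A raises ValueError (and B raises IndexError).
def Pre_find_closest_key_index (dictionary : List (Int × Int)) (value : Int) : Prop :=
  dictionary ≠ []
instance (dictionary : List (Int × Int)) (value : Int) : Decidable (Pre_find_closest_key_index dictionary value) := by unfold Pre_find_closest_key_index; infer_instance

def pvWitness_find_closest_key_index : (List (Int × Int)) × Int := ([(3, 0), (10, 1)], 5)

def Spec_find_closest_key_index (dictionary : List (Int × Int)) (value : Int) (out : Int) : Prop := out = find_closest_key_index_alt dictionary value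
instance (dictionary : List (Int × Int)) (value : Int) (out : Int) : Decidable (Spec_find_closest_key_index dictionary value out) := by unfold Spec_find_closest_key_index; infer_instance

-- ===== CLAIM (what is proved, stated in full; the proofs are below) =====
def Claim_equal_find_closest_key_index : Prop := ∀ (dictionary : List (Int × Int)) (value : Int), Dom_find_closest_key_index dictionary value → Pre_find_closest_key_index dictionary value → Spec_find_closest_key_index dictionary value (find_closest_key_index dictionary value)

-- ===== LEMMAS AND PROOFS =====

-- the key A's loop leaves in closest_key, starting from best key c with best diff m = |value - c|
def pvPick (v c m : Int) : List Int → Int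
  | [] => c
  | k :: ks => if |v - k| < m then pvPick v k |v - k| ks else pvPick v c m ks

lemma pvPick_mem (v : Int) : ∀ (ks : List Int) (c m : Int), pvPick v c m ks ∈ c :: ks := by
  intro ks
  induction ks with
  | nil => intro c m; simp [pvPick]
  | cons k ks ih =>
    intro c m
    by_cases h : |v - k| < m
    · simp only [pvPick, if_pos h]
      rcases List.mem_cons.mp (ih k |v - k|) with h' | h' <;> simp_all
    · simp only [pvPick, if_neg h]
      rcases List.mem_cons.mp (ih c m) with h' | h' <;> simp_all

-- A's loop body, from an already-initialised state, computes pvPick (and the running min)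
lemma pvFold (v : Int) : ∀ (ks : List Int) (c m : Int),
    (ks.foldl
      (fun (acc : Option Int × Option Int) key =>
        match acc.2 with
        | none => (some key, some (|v - key|))
        | some mm => if |v - key| < mm then (some key, some (|v - key|)) else acc)
      (some c, some m)).1
    = some (pvPick v c m ks) := by
  intro ks
  induction ks with
  | nil => intro c m; rfl
  | cons k ks ih =>
    intro c m
    by_cases h : |v - k| < m
    · simp only [List.foldl_cons, if_pos h, ih, pvPick]
    · simp only [List.foldl_cons, if_neg h, ih, pvPick]

-- B's running best (position, key) pair over the keys starting at position s
def pvPickP (v : Int) : Int × Int → Int → List Int → Int × Int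
  | p, _, [] => p
  | p, s, k :: ks => if |v - k| < |v - p.2| then pvPickP v (s, k) (s + 1) ks else pvPickP v p (s + 1) ks

-- one insertion step: the head of insertBy into a nonempty list is the strict-min update
lemma pvInsertBy_head (before : Int × Int → Int × Int → Bool) (x c : Int × Int) (t : List (Int × Int)) :
    ∃ t', PySem.List.insertBy before x (c :: t) = (if before x c then x else c) :: t' := by
  by_cases h : before x c
  · exact ⟨c :: t, by simp [PySem.List.insertBy, h]⟩
  · exact ⟨PySem.List.insertBy before x t, by simp [PySem.List.insertBy, h]⟩

-- the head of the insertion-sort fold from a nonempty accumulator is the running strict-min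
lemma pvFoldIns_head (before : Int × Int → Int × Int → Bool) :
    ∀ (ps : List (Int × Int)) (c : Int × Int) (t : List (Int × Int)),
    ∃ t', ps.foldl (fun acc x => PySem.List.insertBy before x acc) (c :: t)
          = (ps.foldl (fun b x => if before x b then x else b) c) :: t' := by
  intro ps
  induction ps with
  | nil => intro c t; exact ⟨t, rfl⟩
  | cons p ps ih =>
    intro c t
    obtain ⟨t', ht'⟩ := pvInsertBy_head before p c t
    obtain ⟨t'', ht''⟩ := ih (if before p c then p else c) t'
    exact ⟨t'', by simp only [List.foldl_cons, ht', ht'']⟩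

-- the strict-min fold over the enumerated keys is pvPickP
lemma pvFoldEnum (v : Int) : ∀ (ks : List Int) (p : Int × Int) (s : Int),
    (PySem.List.enumerate ks s).foldl
      (fun (b q : Int × Int) => if decide (|v - q.2| < |v - b.2|) = true then q else b) p
    = pvPickP v p s ks := by
  intro ks
  induction ks with
  | nil => intro p s; simp [PySem.List.enumerate_nil, pvPickP]
  | cons k ks ih =>
    intro p s
    rw [PySem.List.enumerate_cons, List.foldl_cons]
    by_cases h : |v - k| < |v - p.2|
    · rw [if_pos (decide_eq_true h), ih (s, k) (s + 1)]
      simp only [pvPickP, if_pos h]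
    · rw [if_neg (fun hc => h (of_decide_eq_true hc)), ih p (s + 1)]
      simp only [pvPickP, if_neg h]

-- pvPickP returns the picked key together with its position (s = base position, t = position of first tail element)
lemma pvPickP_eq (v : Int) : ∀ (ks : List Int) (x s t : Int), x ∉ ks → ks.Nodup →
    pvPickP v (s, x) t ks
    = ((match PySem.List.index? ks (pvPick v x (|v - x|) ks) with
        | none => s
        | some j => t + (j : Int)), pvPick v x (|v - x|) ks) := by
  intro ks
  induction ks with
  | nil =>
    intro x s t _ _
    simp [pvPickP, pvPick, PySem.List.index?]
  | cons k ks ih =>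
    intro x s t hx hnd
    have hxks : x ∉ ks := fun h => hx (List.mem_cons_of_mem _ h)
    have hkks : k ∉ ks := (List.nodup_cons.mp hnd).1
    have hndks : ks.Nodup := (List.nodup_cons.mp hnd).2
    by_cases h : |v - k| < |v - x|
    · simp only [pvPickP, pvPick, if_pos h]
      rw [ih k t (t + 1) hkks hndks]
      set pick := pvPick v k (|v - k|) ks with hpick
      have hmem : pick ∈ k :: ks := pvPick_mem v ks k (|v - k|)
      by_cases hin : pick ∈ ks
      · have hne : k ≠ pick := fun he => hkks (he ▸ hin)
        obtain ⟨j, hj⟩ := Option.isSome_iff_exists.mp ((PySem.List.index?_isSome_iff ks pick).mpr hin)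
        rw [PySem.List.index?_cons_of_ne _ hne, hj]
        simp only [Option.map_some]
        push_cast
        ring_nf
      · have hpk : pick = k := by
          rcases List.mem_cons.mp hmem with h' | h'
          · exact h'
          · exact absurd h' hin
        have hnone : PySem.List.index? ks pick = none :=
          (PySem.List.index?_eq_none_iff ks pick).mpr hin
        rw [hnone, hpk, PySem.List.index?_cons_self]
        simp
    · simp only [pvPickP, pvPick, if_neg h]
      rw [ih x s (t + 1) hxks hndks]
      set pick := pvPick v x (|v - x|) ks with hpick
      have hmem : pick ∈ x :: ks := pvPick_mem v ks x (|v - x|)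
      by_cases hin : pick ∈ ks
      · have hne : k ≠ pick := fun he => hkks (he ▸ hin)
        obtain ⟨j, hj⟩ := Option.isSome_iff_exists.mp ((PySem.List.index?_isSome_iff ks pick).mpr hin)
        rw [PySem.List.index?_cons_of_ne _ hne, hj]
        simp only [Option.map_some]
        push_cast
        ring_nf
      · have hpx : pick = x := by
          rcases List.mem_cons.mp hmem with h' | h'
          · exact h'
          · exact absurd h' hin
        have hnone : PySem.List.index? ks pick = none :=
          (PySem.List.index?_eq_none_iff ks pick).mpr hin
        have hnone2 : PySem.List.index? (k :: ks) pick = none := by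
          apply (PySem.List.index?_eq_none_iff _ pick).mpr
          intro hm
          rcases List.mem_cons.mp hm with h' | h'
          · exact hx (by rw [hpx] at h'; exact (h' ▸ List.mem_cons_self : x ∈ k :: ks))
          · exact hin h'
        rw [hnone, hnone2]

-- ===== VERDICT (by name: the statement is the Claim_ definition above) =====
theorem find_closest_key_index_spec : Claim_equal_find_closest_key_index := by
  intro dictionary value _ hpre
  unfold Spec_find_closest_key_index
  have hne : PySem.List.dedup (dictionary.map (fun p => p.1)) ≠ [] := by
    match dictionary, hpre with
    | (p :: rest), _ =>
      intro hnil
      have hm : p.1 ∈ PySem.List.dedup ((p :: rest).map (fun p => p.1)) := by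
        rw [PySem.List.dedup_eq_ofList]
        exact (PySem.Set.mem_ofList _ _).mpr (by simp)
      rw [hnil] at hm
      simp at hm
  obtain ⟨x, xs, hx⟩ := List.exists_cons_of_ne_nil hne
  have hnd : (x :: xs).Nodup := hx ▸ PySem.List.nodup_dedup _
  have hxxs : x ∉ xs := (List.nodup_cons.mp hnd).1
  have hndxs : xs.Nodup := (List.nodup_cons.mp hnd).2
  unfold find_closest_key_index find_closest_key_index_alt
  simp only [hx]
  -- A side
  rw [List.foldl_cons, pvFold value xs x (|value - x|)]
  -- B side: sorted = insertBy fold; peel the first element, take the head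
  rw [PySem.List.enumerate_cons, PySem.List.sorted_eq_foldl_insertBy, List.foldl_cons]
  obtain ⟨t', ht'⟩ := pvFoldIns_head
    (fun a b => decide (|value - a.2| < |value - b.2|))
    (PySem.List.enumerate xs (1 + 1)) (1, x) []
  rw [show PySem.List.insertBy (fun a b => decide (|value - a.2| < |value - b.2|)) (1, x)
        ([] : List (Int × Int)) = [(1, x)] from rfl, ht',
      pvFoldEnum value xs (1, x) (1 + 1)]
  rw [show (1 + 1 : Int) = 2 by norm_num, pvPickP_eq value xs x 1 2 hxxs hndxs]
  simp only []
  set pick := pvPick value x (|value - x|) xs with hpick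
  have hmem : pick ∈ x :: xs := pvPick_mem value xs x (|value - x|)
  by_cases hin : pick ∈ xs
  · have hne2 : x ≠ pick := fun he => hxxs (he ▸ hin)
    obtain ⟨j, hj⟩ := Option.isSome_iff_exists.mp ((PySem.List.index?_isSome_iff xs pick).mpr hin)
    rw [PySem.List.index?_cons_of_ne _ hne2, hj]
    simp only [Option.map_some]
    push_cast
    ring
  · have hpx : pick = x := by
      rcases List.mem_cons.mp hmem with h' | h'
      · exact h'
      · exact absurd h' hin
    have hnone : PySem.List.index? xs pick = none :=
      (PySem.List.index?_eq_none_iff xs pick).mpr hin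
    rw [hnone, hpx, PySem.List.index?_cons_self]
    simp
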